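-- pv_equiv track=rewrite | github.com/darious/jamarr | app/scanner/tags.py | _normalize_release_type
-- ===== SOURCE A (Python) =====
-- def _normalize_release_type(raw_type):
--     if not raw_type:
--         return "album" # Default fallback
--
--     # 1. Tokenization
--     tokens = [t.strip().lower() for t in raw_type.split(";")]
--     tokens = [t for t in tokens if t] # Filter empty
--
--     if not tokens:
--         return "album"
--
--     # 2. Mapping Rules (First match wins)
--
--     # Live (Prioritized over album as per user request)
--     for t in tokens:
--         if t == "live":
--             return "live"
--
--     # Album: album, album+*
--     for t in tokens:
--         if t == "album" or t.startswith("album"):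
--             return "album"
--
--     # Compilation
--     comp_tokens = {"compilation", "soundtrack", "remix", "dj-mix", "mixtape/street", "demo", "spokenword"}
--     for t in tokens:
--         if t in comp_tokens:
--             return "compilation"
--
--     # EP
--     for t in tokens:
--         if t == "ep":
--             return "ep"
--
--     # Single
--     for t in tokens:
--         if t == "single":
--             return "single"
--
--     # Other (if we have tokens but none matched above)
--     return "other"
-- ===== SOURCE B (Python) =====
-- def _normalize_release_type(raw_type):
--     if not raw_type:
--         return "album"
--     tokens = [t for t in (p.strip().lower() for p in raw_type.split(";")) if t]
--     if not tokens:
--         return "album"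
--     comp_tokens = {"compilation", "soundtrack", "remix", "dj-mix", "mixtape/street", "demo", "spokenword"}
--
--     def rank(t):
--         if t == "live":
--             return 0
--         if t.startswith("album"):
--             return 1
--         if t in comp_tokens:
--             return 2
--         if t == "ep":
--             return 3
--         if t == "single":
--             return 4
--         return None
--
--     best = None
--     for t in tokens:
--         r = rank(t)
--         if r is not None and (best is None or r < best):
--             best = r
--     if best is None:
--         return "other"
--     return ["live", "album", "compilation", "ep", "single"][best]
-- ===== Notes on version B (the rewrite author's own statement) =====
-- stated objective: alternative
-- what changed: Replaces A's five sequential early-returning scans over the token list with a single pass that tracks the minimum priority rank per token and maps the winning rank to its label at the end.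
import Mathlib
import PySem

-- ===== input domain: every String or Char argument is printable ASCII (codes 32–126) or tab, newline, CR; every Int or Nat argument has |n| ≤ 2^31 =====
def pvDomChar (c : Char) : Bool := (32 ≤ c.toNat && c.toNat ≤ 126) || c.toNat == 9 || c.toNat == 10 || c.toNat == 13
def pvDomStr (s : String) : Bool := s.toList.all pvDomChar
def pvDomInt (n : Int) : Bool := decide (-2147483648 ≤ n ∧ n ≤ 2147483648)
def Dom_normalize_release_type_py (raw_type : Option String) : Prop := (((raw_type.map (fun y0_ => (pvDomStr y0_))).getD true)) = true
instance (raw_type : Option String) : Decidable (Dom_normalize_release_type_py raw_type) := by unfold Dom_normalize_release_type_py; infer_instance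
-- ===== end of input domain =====

-- One honest line: B replaces A's five sequential early-returning scans with one
-- minimum-rank pass plus a final rank→label lookup (objective: alternative).

-- ===== PORT A =====
-- the comp_tokens set literal of A
def pvCompSet : PySem.Set String :=
  PySem.Set.ofList ["compilation", "soundtrack", "remix", "dj-mix", "mixtape/street", "demo", "spokenword"]

def normalize_release_type_py (raw_type : Option String) : String :=
  match raw_type with
  | none => "album"
  | some s =>
    if s == "" then "album"
    else
      let tokens := (((PySem.Str.split? s ";").getD []).map
        (fun t => PySem.Str.lower (PySem.Str.strip t))).filter (fun t => !(t == ""))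
      if tokens == [] then "album"
      else if tokens.any (fun t => t == "live") then "live"
      else if tokens.any (fun t => t == "album" || PySem.Str.startswith t "album") then "album"
      else if tokens.any (fun t => PySem.Set.contains pvCompSet t) then "compilation"
      else if tokens.any (fun t => t == "ep") then "ep"
      else if tokens.any (fun t => t == "single") then "single"
      else "other"

-- ===== PORT B =====
def pvRank (t : String) : Option Nat :=
  if t == "live" then some 0
  else if PySem.Str.startswith t "album" then some 1
  else if PySem.Set.contains pvCompSet t then some 2
  else if t == "ep" then some 3
  else if t == "single" then some 4
  else none

-- the body of B's single for-loop over the tokens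
def pvStep (best : Option Nat) (t : String) : Option Nat :=
  match pvRank t with
  | none => best
  | some r =>
    match best with
    | none => some r
    | some b => if r < b then some r else some b

def normalize_release_type_py_alt (raw_type : Option String) : String :=
  match raw_type with
  | none => "album"
  | some s =>
    if s == "" then "album"
    else
      let tokens := (((PySem.Str.split? s ";").getD []).map
        (fun t => PySem.Str.lower (PySem.Str.strip t))).filter (fun t => !(t == ""))
      if tokens == [] then "album"
      else
        match tokens.foldl pvStep none with
        | none => "other"
        | some best => (["live", "album", "compilation", "ep", "single"].getD best "")

-- ===== PRECONDITION & SPEC =====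
def Spec_normalize_release_type_py (raw_type : Option String) (out : String) : Prop := out = normalize_release_type_py_alt raw_type
instance (raw_type : Option String) (out : String) : Decidable (Spec_normalize_release_type_py raw_type out) := by unfold Spec_normalize_release_type_py; infer_instance

-- ===== CLAIM (what is proved, stated in full; the proofs are below) =====
def Claim_equal_normalize_release_type_py : Prop := ∀ (raw_type : Option String), Dom_normalize_release_type_py raw_type → Spec_normalize_release_type_py raw_type (normalize_release_type_py raw_type)

-- ===== LEMMAS AND PROOFS =====

-- combine two partial minima
def pvOptMin (a b : Option Nat) : Option Nat :=
  match a, b with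
  | none, b => b
  | a, none => a
  | some x, some y => some (min x y)

theorem pvStep_eq (b : Option Nat) (t : String) : pvStep b t = pvOptMin b (pvRank t) := by
  unfold pvStep pvOptMin
  cases pvRank t with
  | none => cases b <;> rfl
  | some r =>
    cases b with
    | none => rfl
    | some x =>
      by_cases h : r < x <;> simp [h, Nat.min_def]

theorem pvOptMin_assoc (a b c : Option Nat) : pvOptMin (pvOptMin a b) c = pvOptMin a (pvOptMin b c) := by
  cases a <;> cases b <;> cases c <;> simp [pvOptMin, Nat.min_assoc]

theorem foldl_pvStep (ts : List String) (acc : Option Nat) :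
    ts.foldl pvStep acc = pvOptMin acc (ts.foldl pvStep none) := by
  induction ts generalizing acc with
  | nil => cases acc <;> rfl
  | cons t ts ih =>
    simp only [List.foldl_cons, pvStep_eq]
    rw [ih (pvOptMin acc (pvRank t)), ih (pvOptMin none (pvRank t)), pvOptMin_assoc]
    rfl

-- the minimum rank of a token list, expressed as a chain of membership scans
theorem foldl_pvStep_chain (ts : List String) :
    ts.foldl pvStep none =
      if ts.any (fun t => pvRank t == some 0) then some 0
      else if ts.any (fun t => pvRank t == some 1) then some 1
      else if ts.any (fun t => pvRank t == some 2) then some 2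
      else if ts.any (fun t => pvRank t == some 3) then some 3
      else if ts.any (fun t => pvRank t == some 4) then some 4
      else none := by
  induction ts with
  | nil => rfl
  | cons t ts ih =>
    rw [List.foldl_cons, pvStep_eq, foldl_pvStep, ih]
    have h5 : pvRank t = none ∨ pvRank t = some 0 ∨ pvRank t = some 1 ∨ pvRank t = some 2 ∨
        pvRank t = some 3 ∨ pvRank t = some 4 := by
      unfold pvRank; split_ifs <;> simp
    simp only [List.any_cons]
    obtain ⟨a0, ha0⟩ : ∃ b, ts.any (fun t => pvRank t == some 0) = b := ⟨_, rfl⟩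
    obtain ⟨a1, ha1⟩ : ∃ b, ts.any (fun t => pvRank t == some 1) = b := ⟨_, rfl⟩
    obtain ⟨a2, ha2⟩ : ∃ b, ts.any (fun t => pvRank t == some 2) = b := ⟨_, rfl⟩
    obtain ⟨a3, ha3⟩ : ∃ b, ts.any (fun t => pvRank t == some 3) = b := ⟨_, rfl⟩
    obtain ⟨a4, ha4⟩ : ∃ b, ts.any (fun t => pvRank t == some 4) = b := ⟨_, rfl⟩
    simp only [ha0, ha1, ha2, ha3, ha4]
    rcases h5 with h | h | h | h | h | h <;> simp only [h] <;>
      cases a0 <;> cases a1 <;> cases a2 <;> cases a3 <;> cases a4 <;> simp [pvOptMin]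

-- per-token: rank k holds iff A's k-th scan condition holds (the five conditions are pairwise disjoint)
theorem pvRank0 (t : String) : (pvRank t == some 0) = (t == "live") := by
  unfold pvRank; split_ifs with h1 <;> simp_all

theorem pvRank1 (t : String) :
    (pvRank t == some 1) = (t == "album" || PySem.Str.startswith t "album") := by
  unfold pvRank
  split_ifs with h1 h2
  · have ht : t = "live" := by simpa using h1
    subst ht; decide
  · rw [h2, Bool.or_true]; rfl
  all_goals {
    have ha : (t == "album") = false := by
      cases hb : (t == "album") with
      | false => rfl
      | true =>
        have ht : t = "album" := by simpa using hb
        subst ht; exact absurd (by decide : PySem.Str.startswith "album" "album" = true) h2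
    have hs : PySem.Str.startswith t "album" = false := by simpa using h2
    rw [ha, hs]; rfl }

theorem pvRank2 (t : String) : (pvRank t == some 2) = PySem.Set.contains pvCompSet t := by
  unfold pvRank
  split_ifs with h1 h2 h3
  · have ht : t = "live" := by simpa using h1
    subst ht; decide
  · cases hc : PySem.Set.contains pvCompSet t with
    | false => simp
    | true =>
      have hm : t = "compilation" ∨ t = "soundtrack" ∨ t = "remix" ∨ t = "dj-mix" ∨
          t = "mixtape/street" ∨ t = "demo" ∨ t = "spokenword" := by
        rw [show pvCompSet = ["compilation", "soundtrack", "remix", "dj-mix",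
          "mixtape/street", "demo", "spokenword"] from rfl] at hc
        simpa [PySem.Set.contains] using hc
      rcases hm with rfl | rfl | rfl | rfl | rfl | rfl | rfl <;> revert h2 <;> decide
  · rw [h3]; rfl
  all_goals {
    have hc : PySem.Set.contains pvCompSet t = false := by
      cases hcb : PySem.Set.contains pvCompSet t with
      | false => rfl
      | true => exact absurd hcb h3
    rw [hc]; rfl }

theorem pvRank3 (t : String) : (pvRank t == some 3) = (t == "ep") := by
  unfold pvRank
  split_ifs with h1 h2 h3 h4
  · have ht : t = "live" := by simpa using h1
    subst ht; decide
  · cases hb : (t == "ep") with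
    | false => simp
    | true =>
      have ht : t = "ep" := by simpa using hb
      subst ht; revert h2; decide
  · cases hb : (t == "ep") with
    | false => simp
    | true =>
      have ht : t = "ep" := by simpa using hb
      subst ht; revert h3; decide
  · simp [h4]
  all_goals simp_all

theorem pvRank4 (t : String) : (pvRank t == some 4) = (t == "single") := by
  unfold pvRank
  split_ifs with h1 h2 h3 h4 h5
  · have ht : t = "live" := by simpa using h1
    subst ht; decide
  · cases hb : (t == "single") with
    | false => simp
    | true =>
      have ht : t = "single" := by simpa using hb
      subst ht; revert h2; decide
  · cases hb : (t == "single") with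
    | false => simp
    | true =>
      have ht : t = "single" := by simpa using hb
      subst ht; revert h3; decide
  · cases hb : (t == "single") with
    | false => simp
    | true =>
      have ht : t = "single" := by simpa using hb
      subst ht; revert h4; decide
  · simp [h5]
  all_goals simp_all

-- ===== VERDICT (by name: the statement is the Claim_ definition above) =====
theorem normalize_release_type_py_spec : Claim_equal_normalize_release_type_py := by
  intro raw_type _
  unfold Spec_normalize_release_type_py normalize_release_type_py normalize_release_type_py_alt
  cases raw_type with
  | none => rfl
  | some s =>
    by_cases hs : s == ""
    · simp [hs]
    · simp only [hs, if_false, Bool.false_eq_true]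
      set tokens := (((PySem.Str.split? s ";").getD []).map
        (fun t => PySem.Str.lower (PySem.Str.strip t))).filter (fun t => !(t == "")) with htok
      by_cases ht : tokens == []
      · simp [ht]
      · simp only [ht, if_false, Bool.false_eq_true]
        rw [foldl_pvStep_chain]
        simp only [pvRank0, pvRank1, pvRank2, pvRank3, pvRank4]
        split_ifs <;> rfl
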